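-- pv_equiv track=rewrite | github.com/Vicodertoten/database | scripts/build_distractor_readiness_v1.py | _strongest_source
-- ===== SOURCE A (Python) =====
-- from collections import Counter, defaultdict
--
-- def _strongest_source(sources: Counter) -> str:
--     """Return the highest-priority source present in the candidate set."""
--     priority = [
--         "inaturalist_similar_species",
--         "taxonomic_neighbor_same_genus",
--         "taxonomic_neighbor_same_family",
--         "taxonomic_neighbor_same_order",
--         "ai_pedagogical_proposal",
--         "manual_expert",
--         "emergency_diversity_fallback",
--     ]
--     for s in priority:
--         if sources.get(s, 0) > 0:
--             return s
--     return "none"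
-- ===== SOURCE B (Python) =====
-- PRIORITY = [
--     "inaturalist_similar_species",
--     "taxonomic_neighbor_same_genus",
--     "taxonomic_neighbor_same_family",
--     "taxonomic_neighbor_same_order",
--     "ai_pedagogical_proposal",
--     "manual_expert",
--     "emergency_diversity_fallback",
-- ]
--
-- _RANK = {s: i for i, s in enumerate(PRIORITY)}
--
-- def _strongest_source(sources) -> str:
--     """Single pass over the counter's items, keeping the best-ranked source."""
--     best = None
--     for s, c in sources.items():
--         if c > 0 and s in _RANK and (best is None or _RANK[s] < _RANK[best]):
--             best = s
--     return best if best is not None else "none"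
-- ===== Notes on version B (the rewrite author's own statement) =====
-- stated objective: alternative
-- what changed: A scans the fixed priority list and returns the first name with a positive count; B precomputes a name-to-rank dict once and makes a single pass over the counter's items, keeping the present key of minimum rank.
import Mathlib
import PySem

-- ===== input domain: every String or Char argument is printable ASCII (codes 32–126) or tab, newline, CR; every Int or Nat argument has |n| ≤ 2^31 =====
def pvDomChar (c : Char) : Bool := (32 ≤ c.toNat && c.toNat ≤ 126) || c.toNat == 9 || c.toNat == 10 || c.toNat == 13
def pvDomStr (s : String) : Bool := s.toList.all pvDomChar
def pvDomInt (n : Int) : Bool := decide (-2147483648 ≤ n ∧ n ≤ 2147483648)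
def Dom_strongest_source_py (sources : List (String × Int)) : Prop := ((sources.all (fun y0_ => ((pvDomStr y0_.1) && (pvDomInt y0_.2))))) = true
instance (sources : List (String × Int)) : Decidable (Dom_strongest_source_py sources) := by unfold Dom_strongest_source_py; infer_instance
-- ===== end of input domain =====

-- B replaces A's scan of the fixed priority list with one pass over the counter's items,
-- keeping the present key of minimum precomputed rank (objective: alternative).


-- ===== PORT A =====
-- the fixed priority list shared by A and B
def pvPriority : List String :=
  [ "inaturalist_similar_species",
    "taxonomic_neighbor_same_genus",
    "taxonomic_neighbor_same_family",
    "taxonomic_neighbor_same_order",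
    "ai_pedagogical_proposal",
    "manual_expert",
    "emergency_diversity_fallback" ]

-- A's loop: 'for s in priority: if sources.get(s, 0) > 0: return s' then 'return "none"'
def pvLoopA (sources : List (String × Int)) : List String → String
  | [] => "none"
  | s :: rest =>
      if 0 < (PySem.Dict.mk sources).getD s 0 then s else pvLoopA sources rest

def strongest_source_py (sources : List (String × Int)) : String :=
  pvLoopA sources pvPriority

-- ===== PORT B =====
-- _RANK = {s: i for i, s in enumerate(PRIORITY)}
def pvRank : PySem.Dict String Int :=
  PySem.Dict.ofList ((PySem.List.enumerate pvPriority 0).map (fun q => (q.2, (q.1 : Int))))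

-- one loop iteration: 'if c > 0 and s in _RANK and (best is None or _RANK[s] < _RANK[best]): best = s'
-- (Python evaluates _RANK[best] only when best is not None; 'best.getD ""' is that key there)
def pvStepB (best : Option String) (p : String × Int) : Option String :=
  if (decide (0 < p.2) && pvRank.contains p.1 &&
      (best.isNone || decide (pvRank.getD p.1 0 < pvRank.getD (best.getD "") 0)))
  then some p.1 else best

def strongest_source_py_alt (sources : List (String × Int)) : String :=
  match sources.foldl pvStepB none with
  | some s => s
  | none => "none"

-- ===== PRECONDITION & SPEC =====
-- Pre_ excludes association lists with duplicate keys: the Python argument is a Counter (a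
-- dict), whose keys are necessarily distinct, so no Python input is excluded.
def Pre_strongest_source_py (sources : List (String × Int)) : Prop :=
  (sources.map Prod.fst).Nodup
instance (sources : List (String × Int)) : Decidable (Pre_strongest_source_py sources) := by
  unfold Pre_strongest_source_py; infer_instance

def pvWitness_strongest_source_py : (List (String × Int)) :=
  [("manual_expert", 2), ("zzz", 5), ("ai_pedagogical_proposal", 0)]

def Spec_strongest_source_py (sources : List (String × Int)) (out : String) : Prop := out = strongest_source_py_alt sources
instance (sources : List (String × Int)) (out : String) : Decidable (Spec_strongest_source_py sources out) := by unfold Spec_strongest_source_py; infer_instance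

-- ===== CLAIM (what is proved, stated in full; the proofs are below) =====
def Claim_equal_strongest_source_py : Prop := ∀ (sources : List (String × Int)), Dom_strongest_source_py sources → Pre_strongest_source_py sources → Spec_strongest_source_py sources (strongest_source_py sources)

-- ===== LEMMAS AND PROOFS =====

-- pvRank as a literal dict
theorem pvRank_eq : pvRank = PySem.Dict.mk
    [ ("inaturalist_similar_species", 0),
      ("taxonomic_neighbor_same_genus", 1),
      ("taxonomic_neighbor_same_family", 2),
      ("taxonomic_neighbor_same_order", 3),
      ("ai_pedagogical_proposal", 4),
      ("manual_expert", 5),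
      ("emergency_diversity_fallback", 6) ] := by decide

-- rank membership ↔ membership in the priority list
theorem pvRank_contains_iff (s : String) :
    pvRank.contains s = true ↔ s ∈ pvPriority := by
  rw [pvRank_eq]
  simp [pvPriority, PySem.Dict.contains_mk]
  tauto

-- rank value = index in the priority list (for members)
theorem pvRank_getD_eq_idxOf (s : String) (hs : s ∈ pvPriority) :
    pvRank.getD s 0 = (pvPriority.idxOf s : Int) := by
  simp [pvPriority] at hs
  rcases hs with h|h|h|h|h|h|h <;> subst h <;> decide

-- a pair that B's loop accepts
def pvQualB (p : String × Int) : Prop := 0 < p.2 ∧ pvRank.contains p.1 = true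

-- the key s is carried by some accepted pair of l
def pvQual (l : List (String × Int)) (s : String) : Prop :=
  ∃ p ∈ l, p.1 = s ∧ pvQualB p

-- first-match lookup agrees with ∃-search under Nodup keys
theorem pvLookup_pos_iff (l : List (String × Int)) (s : String)
    (h : (l.map Prod.fst).Nodup) :
    (0 < (PySem.Dict.mk l).getD s 0) ↔ ∃ p ∈ l, p.1 = s ∧ 0 < p.2 := by
  induction l with
  | nil => simp [PySem.Dict.getD, PySem.Dict.get?]
  | cons q t ih =>
    simp only [List.map_cons, List.nodup_cons] at h
    rw [PySem.Dict.getD_eq_get?_getD, PySem.Dict.get?_mk_cons]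
    by_cases hq : q.1 = s
    · subst hq
      simp only [BEq.rfl]
      constructor
      · intro hv; exact ⟨q, List.mem_cons_self, rfl, hv⟩
      · rintro ⟨p, hp, hps, hpv⟩
        rcases List.mem_cons.1 hp with rfl | hp'
        · exact hpv
        · exact absurd (hps ▸ List.mem_map_of_mem hp') h.1
    · rw [if_neg (by simpa using hq), ← PySem.Dict.getD_eq_get?_getD, ih h.2]
      constructor
      · rintro ⟨p, hp, hps, hpv⟩; exact ⟨p, List.mem_cons_of_mem _ hp, hps, hpv⟩
      · rintro ⟨p, hp, hps, hpv⟩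
        rcases List.mem_cons.1 hp with rfl | hp'
        · exact absurd hps hq
        · exact ⟨p, hp', hps, hpv⟩

-- B's step keeps none exactly when the pair is not accepted
theorem pvStepB_none_iff (acc : Option String) (p : String × Int) :
    pvStepB acc p = none ↔ acc = none ∧ ¬ pvQualB p := by
  unfold pvStepB pvQualB
  split_ifs with h
  · simp only [Bool.and_eq_true, decide_eq_true_eq] at h
    simp only [false_iff]
    rintro ⟨-, hq⟩
    exact hq ⟨h.1.1, h.1.2⟩
  · constructor
    · intro ha
      refine ⟨ha, fun hq => h ?_⟩
      subst ha
      simp [hq.1, hq.2]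
    · exact fun ha => ha.1

-- B's fold returns none iff nothing qualifies
theorem pvFoldB_none (l : List (String × Int)) (acc : Option String) :
    l.foldl pvStepB acc = none ↔ (acc = none ∧ ∀ s, ¬ pvQual l s) := by
  induction l generalizing acc with
  | nil => simp [pvQual]
  | cons p t ih =>
    rw [List.foldl_cons, ih]
    rw [pvStepB_none_iff]
    constructor
    · rintro ⟨⟨ha, hqp⟩, hall⟩
      refine ⟨ha, fun s hs => ?_⟩
      rcases hs with ⟨q, hq, hqs, hqb⟩
      rcases List.mem_cons.1 hq with rfl | hq'
      · exact hqp hqb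
      · exact hall s ⟨q, hq', hqs, hqb⟩
    · rintro ⟨ha, hall⟩
      refine ⟨⟨ha, fun hq => hall p.1 ⟨p, List.mem_cons_self, rfl, hq⟩⟩, fun s hs => ?_⟩
      rcases hs with ⟨q, hq, hqs, hqb⟩
      exact hall s ⟨q, List.mem_cons_of_mem _ hq, hqs, hqb⟩

-- B's fold returns a qualifying key of minimal rank
theorem pvFoldB_some (l : List (String × Int)) (acc : Option String) (s : String)
    (h : l.foldl pvStepB acc = some s) :
    (acc = some s ∨ pvQual l s) ∧
    (∀ t, pvQual l t → pvRank.getD s 0 ≤ pvRank.getD t 0) ∧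
    (∀ a, acc = some a → pvRank.getD s 0 ≤ pvRank.getD a 0) := by
  induction l generalizing acc with
  | nil =>
    simp only [List.foldl_nil] at h
    refine ⟨Or.inl h, fun t ht => absurd ht (by simp [pvQual]), fun a ha => ?_⟩
    rw [h] at ha; cases ha; exact le_refl _
  | cons p t ih =>
    rw [List.foldl_cons] at h
    obtain ⟨h1, h2, h3⟩ := ih (pvStepB acc p) h
    have hstep : ∀ a, pvStepB acc p = some a →
        pvRank.getD a 0 ≤ pvRank.getD p.1 0 ∨ ¬ pvQualB p := by
      intro a ha
      unfold pvStepB at ha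
      split_ifs at ha with hc
      · cases ha; exact Or.inl (le_refl _)
      · simp only [Bool.and_eq_true, Bool.or_eq_true, decide_eq_true_eq, not_and, not_or,
          Option.isNone_iff_eq_none] at hc
        by_cases hq : pvQualB p
        · left
          have := hc ⟨hq.1, hq.2⟩
          rcases acc with _ | b
          · exact absurd rfl this.1
          · cases ha
            simpa using this.2
        · exact Or.inr hq
    constructor
    · rcases h1 with h1 | h1
      · unfold pvStepB at h1
        split_ifs at h1 with hc
        · cases h1
          simp only [Bool.and_eq_true, decide_eq_true_eq] at hc
          exact Or.inr ⟨p, List.mem_cons_self, rfl, hc.1.1, hc.1.2⟩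
        · exact Or.inl h1
      · rcases h1 with ⟨q, hq, hqs, hqb⟩
        exact Or.inr ⟨q, List.mem_cons_of_mem _ hq, hqs, hqb⟩
    constructor
    · intro u hu
      rcases hu with ⟨q, hq, hqs, hqb⟩
      rcases List.mem_cons.1 hq with rfl | hq'
      · -- u is the head's key
        subst hqs
        rcases hacc : pvStepB acc q with _ | b
        · exact absurd hqb ((pvStepB_none_iff acc q).1 hacc).2
        · rcases hstep b hacc with hle | hnq
          · exact le_trans (h3 b hacc) hle
          · exact absurd hqb hnq
      · exact h2 u ⟨q, hq', hqs, hqb⟩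
    · intro a ha
      subst ha
      rcases hacc : pvStepB (some a) p with _ | b
      · rw [pvStepB_none_iff] at hacc; cases hacc.1
      · have hb := h3 b hacc
        unfold pvStepB at hacc
        split_ifs at hacc with hc
        · cases hacc
          simp only [Bool.and_eq_true, Bool.or_eq_true, decide_eq_true_eq,
            Option.isNone_some, Bool.false_eq_true, false_or, Option.getD_some] at hc
          exact le_trans hb (le_of_lt hc.2)
        · cases hacc; exact hb

-- A's loop returns "none" when no listed source is positive
theorem pvLoopA_eq_none (l : List (String × Int)) (P : List String)
    (h : ∀ s ∈ P, ¬ (0 < (PySem.Dict.mk l).getD s 0)) :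
    pvLoopA l P = "none" := by
  induction P with
  | nil => rfl
  | cons a P' ih =>
    rw [pvLoopA, if_neg (h a List.mem_cons_self)]
    exact ih (fun s hs => h s (List.mem_cons_of_mem _ hs))

-- A's loop returns the positive source of minimal position
theorem pvLoopA_eq (l : List (String × Int)) (P : List String) (s : String)
    (hs : s ∈ P) (hpos : 0 < (PySem.Dict.mk l).getD s 0)
    (hmin : ∀ t ∈ P, 0 < (PySem.Dict.mk l).getD t 0 → P.idxOf s ≤ P.idxOf t) :
    pvLoopA l P = s := by
  induction P with
  | nil => cases hs
  | cons a P' ih =>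
    by_cases ha : 0 < (PySem.Dict.mk l).getD a 0
    · rw [pvLoopA, if_pos ha]
      by_cases hsa : s = a
      · exact hsa.symm
      · exfalso
        have := hmin a List.mem_cons_self ha
        rw [List.idxOf_cons_self] at this
        rw [List.idxOf_cons_ne _ (by exact fun h => hsa h.symm)] at this
        omega
    · rw [pvLoopA, if_neg ha]
      have hsa : s ≠ a := fun h => ha (h ▸ hpos)
      have hs' : s ∈ P' := by
        rcases List.mem_cons.1 hs with h | h
        · exact absurd h hsa
        · exact h
      refine ih hs' (fun t ht hp => ?_)
      have := hmin t (List.mem_cons_of_mem _ ht) hp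
      have hta : t ≠ a := fun h => ha (h ▸ hp)
      rw [List.idxOf_cons_ne _ (by exact fun h => hsa h.symm),
          List.idxOf_cons_ne _ (by exact fun h => hta h.symm)] at this
      omega

-- ===== VERDICT (by name: the statement is the Claim_ definition above) =====
theorem strongest_source_py_spec : Claim_equal_strongest_source_py := by
  intro l _ hpre
  unfold Spec_strongest_source_py strongest_source_py strongest_source_py_alt
  rcases hf : l.foldl pvStepB none with _ | s
  · have hn := (pvFoldB_none l none).1 hf
    apply pvLoopA_eq_none
    intro s hs hpos
    rcases (pvLookup_pos_iff l s hpre).1 hpos with ⟨p, hp, hps, hpv⟩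
    exact hn.2 s ⟨p, hp, hps, hpv, by rw [hps]; exact (pvRank_contains_iff s).2 hs⟩
  · obtain ⟨h1, h2, -⟩ := pvFoldB_some l none s hf
    have hq : pvQual l s := by
      rcases h1 with h | h
      · cases h
      · exact h
    obtain ⟨p, hp, hps, hpv, hc⟩ := hq
    have hsmem : s ∈ pvPriority := (pvRank_contains_iff s).1 (by rw [← hps]; exact hc)
    have hpos : 0 < (PySem.Dict.mk l).getD s 0 :=
      (pvLookup_pos_iff l s hpre).2 ⟨p, hp, hps, hpv⟩
    apply pvLoopA_eq l pvPriority s hsmem hpos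
    intro t ht hpt
    rcases (pvLookup_pos_iff l t hpre).1 hpt with ⟨q, hq', hqs, hqv⟩
    have hle := h2 t ⟨q, hq', hqs, hqv, by rw [hqs]; exact (pvRank_contains_iff t).2 ht⟩
    rw [pvRank_getD_eq_idxOf s hsmem, pvRank_getD_eq_idxOf t ht] at hle
    exact_mod_cast hle
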